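-- pv_equiv track=rewrite | github.com/yoongdoo0819/Algorithm | programmers14.py | custom_list
-- ===== SOURCE A (Python) =====
-- def custom_list(string):
--     result = []
--     temp_list = []
--     string = string[1:-1]
--     string = string.replace(",", " ")
--     conn_str = ""
--
--     for idx in range(len(string)):
--         str = string[idx]
--
--         if str.isdigit():
--             conn_str += str
--         if str == '{':
--             continue
--         elif str == '}':
--             temp_list = []
--             split_strs = conn_str.split()
--             for split_str in split_strs:
--                 temp_list.append(split_str)
--             result.append(set(temp_list))
--             temp_list = []
--             conn_str = ""
--         elif str == ' ':
--             if string[idx+1].isdigit():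
--                 conn_str += " "
--
--     return result
-- ===== SOURCE B (Python) =====
-- def custom_list(string):
--     inner = string[1:-1].replace(",", " ")
--     return [set(group.replace("{", "").split()) for group in inner.split("}")[:-1]]
-- ===== Notes on version B (the rewrite author's own statement) =====
-- stated objective: faster
-- what changed: Replaces A's per-character state machine (digit accumulator with one-character lookahead) by bulk string operations: strip string[1:-1], replace commas with spaces, split on '}', and turn each group into the set of its whitespace-split tokens after deleting '{'; Pre_ keeps the parser's natural set-notation domain, excluding inputs where A ignores stray non-alphabet characters or merges digit runs across a space-then-'{' via its accidental lookahead, and inputs whose stripped string ends in a space, where A raises IndexError.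
-- outside the precondition, e.g. on custom_list('{1 {2}}'): A returns [{'12'}], B returns [{'1', '2'}]; on custom_list('{{a,1}}'): A returns [{'1'}], B returns [{'1', 'a'}]; on custom_list('{{12junk}}'): A returns [{'12'}], B returns [{'12junk'}]
-- crash fix: On inputs whose inner string[1:-1] (after replacing ',' by ' ') ends in a space, A raises IndexError from its string[idx+1] lookahead; B returns the parsed list of sets. — e.g. on custom_list("{{1} }"): A raises IndexError, B returns [["1"]]
import Mathlib
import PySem

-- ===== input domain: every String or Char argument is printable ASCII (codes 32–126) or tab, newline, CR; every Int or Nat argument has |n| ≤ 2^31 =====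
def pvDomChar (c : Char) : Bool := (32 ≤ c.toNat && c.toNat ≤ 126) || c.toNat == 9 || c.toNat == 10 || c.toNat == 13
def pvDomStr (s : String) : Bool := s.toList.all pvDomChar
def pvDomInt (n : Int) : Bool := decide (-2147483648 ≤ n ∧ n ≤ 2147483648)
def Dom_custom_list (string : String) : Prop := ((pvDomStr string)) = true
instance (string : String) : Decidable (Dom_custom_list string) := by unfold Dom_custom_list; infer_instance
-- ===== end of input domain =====

-- B replaces A's character-by-character digit/lookahead state machine by bulk string operations
-- (measured faster in a timing run): strip the outer characters, split on '}', and turn each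
-- brace group into the set of its whitespace-split tokens after deleting '{'. Equality of the
-- return values is proved on Pre_, which keeps the parser's natural domain (set-notation input)
-- and excludes A's IndexError inputs.

-- ===== PORT A =====
def custom_list (string : String) : List (List String) :=
  let string := PySem.Str.replace (PySem.Str.slice string (some 1) (some (-1))) "," " "
  -- for idx in range(len(string)) with state (result, conn_str); temp_list is rebuilt in the '}' branch
  (((PySem.List.pyRange 0 (PySem.Str.len string) 1).foldl
    (fun (st : List (List String) × String) idx =>
      let result := st.1
      let conn_str := st.2
      -- string[idx]: always in range for idx from range(len(string))
      let str := (PySem.Str.pyGet? string idx).getD ' '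
      let conn_str := if PySem.Chars.isdigit str then conn_str.push str else conn_str
      if str = '{' then (result, conn_str)
      else if str = '}' then
        let split_strs := PySem.Str.split₀ conn_str
        let temp_list := split_strs.foldl (fun tl s => tl ++ [s]) ([] : List String)
        (result ++ [PySem.Set.ofList temp_list], "")
      else if str = ' ' then
        -- string[idx+1]: none = IndexError in Python (excluded by Pre_custom_list)
        if ((PySem.Str.pyGet? string (idx + 1)).map PySem.Chars.isdigit).getD false
        then (result, conn_str.push ' ')
        else (result, conn_str)
      else (result, conn_str))
    (([] : List (List String)), ("" : String))).1)

-- ===== PORT B =====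
def custom_list_alt (string : String) : List (List String) :=
  let inner := PySem.Str.replace (PySem.Str.slice string (some 1) (some (-1))) "," " "
  (((PySem.Str.split? inner "}").getD []).dropLast).map
    (fun group => PySem.Set.ofList (PySem.Str.split₀ (PySem.Str.replace group "{" "")))

-- ===== PRECONDITION & SPEC =====

-- string[1:-1] with ',' replaced by ' ' — the character list A's loop actually scans
def pvInner (string : String) : List Char :=
  (string.toList.tail.dropLast).map (fun c => if c = ',' then ' ' else c)

-- Pre_ keeps the parser's natural domain: inside string[1:-1], every character that still lies
-- before some closing brace must belong to the set-notation alphabet (digits, braces, comma,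
-- space), no '{' may follow a digit without a '}' in between (unclosed nesting after data), and
-- the stripped string must not end in a space/comma — on that last case A raises IndexError.
def Pre_custom_list (string : String) : Prop :=
  (∀ i ∈ List.range (pvInner string).length,
      (∃ m ∈ List.range (pvInner string).length, i ≤ m ∧ (pvInner string)[m]! = '}') →
      (pvInner string)[i]! ∈ ['0','1','2','3','4','5','6','7','8','9','{','}',' ']) ∧
  ((pvInner string).getLast? ≠ some ' ') ∧
  (∀ i ∈ List.range (pvInner string).length, ∀ j ∈ List.range (pvInner string).length,
      i < j → PySem.Chars.isdigit ((pvInner string)[i]!) = true → (pvInner string)[j]! = '{' →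
      (∃ m ∈ List.range (pvInner string).length, j ≤ m ∧ (pvInner string)[m]! = '}') →
      ∃ k ∈ List.range (pvInner string).length, i < k ∧ k < j ∧ (pvInner string)[k]! = '}')
instance (string : String) : Decidable (Pre_custom_list string) := by
  unfold Pre_custom_list; infer_instance
def pvWitness_custom_list : String := "{{1,2},{3}}"

-- On inputs whose stripped inner string ends in a space (after the comma replacement) A raises
-- IndexError from the one-character lookahead; B returns the parsed list of sets instead.
def Raises_custom_list (string : String) : Prop := (pvInner string).getLast? = some ' '
instance (string : String) : Decidable (Raises_custom_list string) := by
  unfold Raises_custom_list; infer_instance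
def pvRaiseWitness_custom_list : String := "{{1} }"
def pvRaiseWitnessOut_custom_list : List (List String) := [["1"]]

def Spec_custom_list (string : String) (out : List (List String)) : Prop := out = custom_list_alt string
instance (string : String) (out : List (List String)) : Decidable (Spec_custom_list string out) := by unfold Spec_custom_list; infer_instance

-- ===== CLAIM (what is proved, stated in full; the proofs are below) =====
def Claim_equal_custom_list : Prop := ∀ (string : String), Dom_custom_list string → Pre_custom_list string → Spec_custom_list string (custom_list string)
def Claim_raises_custom_list : Prop := (∀ (string : String), Dom_custom_list string → Raises_custom_list string → ¬ Pre_custom_list string) ∧ (Dom_custom_list (pvRaiseWitness_custom_list) ∧ Raises_custom_list (pvRaiseWitness_custom_list) ∧ custom_list_alt (pvRaiseWitness_custom_list) = pvRaiseWitnessOut_custom_list)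

-- ===== LEMMAS AND PROOFS =====

-- ---- proof-layer vocabulary (char-list level) ----

def startsDigit : List Char → Bool
  | [] => false
  | c :: _ => PySem.Chars.isdigit c

-- A's conn_str after scanning a stretch of characters (lookahead stays inside the stretch)
def connAfter : List Char → List Char → List Char
  | conn, [] => conn
  | conn, c :: rest =>
      connAfter
        (if PySem.Chars.isdigit c then conn ++ [c]
         else if c = ' ' && startsDigit rest then conn ++ [' ']
         else conn) rest

-- A's loop as structural recursion over the character list
def aRun : List Char → List Char → List (List String)
  | [], _ => []
  | c :: rest, conn =>
    if PySem.Chars.isdigit c then aRun rest (conn ++ [c])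
    else if c = '{' then aRun rest conn
    else if c = '}' then
      PySem.Set.ofList ((PySem.Chars.split₀ conn).map String.ofList) :: aRun rest []
    else if c = ' ' then aRun rest (if startsDigit rest then conn ++ [' '] else conn)
    else aRun rest conn

def splitSep (sep : Char) : List Char → List (List Char)
  | [] => [[]]
  | c :: rest => if c = sep then [] :: splitSep sep rest else (splitSep sep rest).modifyHead (c :: ·)

def wordsAux : List Char → List Char → List (List Char)
  | cur, [] => if cur = [] then [] else [cur]
  | cur, c :: rest =>
    if PySem.Chars.isspace c then
      if cur = [] then wordsAux [] rest else cur :: wordsAux [] rest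
    else wordsAux (cur ++ [c]) rest

def emit (conn p : List Char) : List String :=
  (PySem.Chars.split₀ (connAfter conn p)).map String.ofList

def emits (conn : List Char) : List (List Char) → List (List String)
  | [] => []
  | p :: ps => PySem.Set.ofList (emit conn p) :: ps.map (fun q => PySem.Set.ofList (emit [] q))

-- ---- generic helpers ----

theorem ofList_nil : ("" : String) = String.ofList [] := by
  apply String.toList_inj.mp; simp

theorem ofList_push (l : List Char) (c : Char) :
    (String.ofList l).push c = String.ofList (l ++ [c]) := by
  apply String.toList_inj.mp; simp

theorem foldl_snoc (l : List String) (a : List String) :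
    l.foldl (fun tl s => tl ++ [s]) a = a ++ l := by
  induction l generalizing a with
  | nil => simp
  | cons x xs ih => simp [ih]

theorem modifyHead_nilapp (l : List (List Char)) :
    l.modifyHead (fun x => [] ++ x) = l := by
  cases l <;> simp

theorem modifyHead_id' {α : Type} (l : List α) : l.modifyHead (fun x => x) = l := by
  cases l <;> rfl

theorem pyRange_self (a : Int) : PySem.List.pyRange a a 1 = [] := by
  simp [PySem.List.pyRange]

theorem isspace_of_isdigit (c : Char) (h : PySem.Chars.isdigit c = true) :
    PySem.Chars.isspace c = false := by
  simp only [PySem.Chars.isdigit, Bool.and_eq_true, decide_eq_true_eq] at h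
  obtain ⟨h1, h2⟩ := h
  rw [Char.le_def, UInt32.le_iff_toNat_le] at h1 h2
  have e1 : ('0' : Char).val.toNat = 48 := by decide
  have e2 : ('9' : Char).val.toNat = 57 := by decide
  have hc : Char.toNat c = c.val.toNat := rfl
  simp only [PySem.Chars.isspace, hc, Bool.or_eq_false_iff, Bool.and_eq_false_iff,
    decide_eq_false_iff_not]
  omega

theorem startsDigit_head? (l : List Char) :
    ((l.head?).map PySem.Chars.isdigit).getD false = startsDigit l := by
  cases l <;> simp [startsDigit]

-- ---- split₀ (str.split()) characterization ----

theorem split₀_go_eq : ∀ (l cur : List Char) (acc : List (List Char)),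
    PySem.Chars.split₀.go l cur acc = acc.reverse ++ wordsAux cur.reverse l := by
  intro l
  induction l with
  | nil =>
    intro cur acc
    by_cases hc : cur = [] <;>
      simp [PySem.Chars.split₀.go, wordsAux, hc]
  | cons c rest ih =>
    intro cur acc
    by_cases hs : PySem.Chars.isspace c = true
    · by_cases hc : cur = [] <;>
        simp [PySem.Chars.split₀.go, wordsAux, hs, hc, ih]
    · simp only [Bool.not_eq_true] at hs
      simp [PySem.Chars.split₀.go, wordsAux, hs, ih, List.reverse_cons]

theorem split₀_eq_wordsAux (l : List Char) :
    PySem.Chars.split₀ l = wordsAux [] l := by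
  unfold PySem.Chars.split₀
  simp [split₀_go_eq]

-- ---- split(sep) characterization ----

theorem splitOn_go_eq (sep : Char) : ∀ (fuel : Nat) (l cur : List Char) (acc : List (List Char)),
    l.length < fuel →
    PySem.Chars.splitOn.go [sep] fuel l cur acc
      = acc.reverse ++ (splitSep sep l).modifyHead (fun x => cur.reverse ++ x) := by
  intro fuel
  induction fuel with
  | zero => intro l cur acc h; exact absurd h (Nat.not_lt_zero _)
  | succ fuel ih =>
    intro l cur acc h
    cases l with
    | nil => simp [PySem.Chars.splitOn.go, splitSep]
    | cons c rest =>
      by_cases hc : c = sep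
      · subst hc
        have hpre : [c].isPrefixOf (c :: rest) = true := by simp [List.isPrefixOf]
        simp only [PySem.Chars.splitOn.go, hpre, if_pos, List.length_cons, List.length_nil,
          List.drop_succ_cons, List.drop_zero]
        rw [ih rest [] _ (by simpa using Nat.lt_of_succ_lt_succ h)]
        simp [splitSep, modifyHead_nilapp, modifyHead_id']
      · have hpre : [sep].isPrefixOf (c :: rest) = false := by
          simp [List.isPrefixOf, Ne.symm hc]
        simp only [PySem.Chars.splitOn.go, hpre, Bool.false_eq_true, if_false]
        rw [ih rest (c :: cur) _ (by simpa using Nat.lt_of_succ_lt_succ h)]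
        simp only [splitSep, hc, if_false, List.modifyHead_modifyHead, List.reverse_cons]
        congr 2
        funext x
        simp

theorem splitOn_eq (sep : Char) (l : List Char) :
    PySem.Chars.splitOn l [sep] = splitSep sep l := by
  unfold PySem.Chars.splitOn
  rw [splitOn_go_eq sep (l.length + 1) l [] [] (by omega)]
  simp [modifyHead_nilapp, modifyHead_id', List.modifyHead_id]

theorem splitSep_ne_nil (sep : Char) : ∀ l, splitSep sep l ≠ [] := by
  intro l
  induction l with
  | nil => simp [splitSep]
  | cons c rest ih =>
    by_cases hc : c = sep
    · simp [splitSep, hc]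
    · simp only [splitSep, hc, if_false]
      cases h : splitSep sep rest with
      | nil => exact absurd h ih
      | cons q qs => simp

theorem splitSep_cons (sep : Char) (l : List Char) : ∃ p ps, splitSep sep l = p :: ps := by
  cases h : splitSep sep l with
  | nil => exact absurd h (splitSep_ne_nil sep l)
  | cons p ps => exact ⟨p, ps, rfl⟩

theorem splitSep_head_takeWhile (sep : Char) : ∀ (l : List Char),
    (splitSep sep l).headD [] = l.takeWhile (fun c => !(c == sep)) := by
  intro l
  induction l with
  | nil => simp [splitSep]
  | cons c rest ih =>
    by_cases hc : c = sep
    · simp [splitSep, hc, List.takeWhile_cons]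
    · obtain ⟨q, qs, hqs⟩ := splitSep_cons sep rest
      simp only [splitSep, hc, if_false, hqs, List.modifyHead, List.headD_cons,
        List.takeWhile_cons]
      rw [hqs] at ih
      simp only [List.headD_cons] at ih
      simp [hc, ih]

theorem splitSep_no_sep (sep : Char) : ∀ (l : List Char), ∀ p ∈ splitSep sep l, sep ∉ p := by
  intro l
  induction l with
  | nil => intro p hp; simp [splitSep] at hp; simp [hp]
  | cons c rest ih =>
    intro p hp
    by_cases hc : c = sep
    · simp only [splitSep, hc, if_pos, List.mem_cons] at hp
      rcases hp with hp | hp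
      · simp [hp]
      · exact ih p hp
    · obtain ⟨q, qs, hqs⟩ := splitSep_cons sep rest
      simp only [splitSep, hc, if_false, hqs, List.modifyHead, List.mem_cons] at hp
      rcases hp with hp | hp
      · subst hp
        intro hmem
        rcases List.mem_cons.mp hmem with h1 | h1
        · exact hc h1.symm
        · exact ih q (by simp [hqs]) h1
      · exact ih p (by simp [hqs, hp])

-- one unfolding step of splitSep: the head piece and the remainder after the first separator
theorem splitSep_unfold (sep : Char) : ∀ (l : List Char) q qs, splitSep sep l = q :: qs →
    (qs = [] ∧ l = q) ∨ ∃ t, l = q ++ sep :: t ∧ splitSep sep t = qs := by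
  intro l
  induction l with
  | nil =>
    intro q qs h
    simp only [splitSep] at h
    cases h
    exact Or.inl ⟨rfl, rfl⟩
  | cons c rest ih =>
    intro q qs h
    by_cases hc : c = sep
    · subst hc
      simp only [splitSep, if_pos] at h
      cases h
      exact Or.inr ⟨rest, by simp, rfl⟩
    · obtain ⟨q', qs', hqs⟩ := splitSep_cons sep rest
      simp only [splitSep, hc, if_false, hqs, List.modifyHead] at h
      injection h with hh1 hh2
      subst hh1
      subst hh2
      rcases ih q' qs' hqs with ⟨h1, h2⟩ | ⟨t, h1, h2⟩
      · exact Or.inl ⟨h1, by rw [h2]⟩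
      · exact Or.inr ⟨t, by rw [h1]; simp, h2⟩

-- every non-final piece is followed in l by the separator
theorem splitSep_piece (sep : Char) : ∀ (n : Nat) (l : List Char), l.length ≤ n →
    ∀ p ∈ (splitSep sep l).dropLast, ∃ s t, l = s ++ p ++ sep :: t := by
  intro n
  induction n with
  | zero =>
    intro l hl p hp
    have : l = [] := List.length_eq_zero_iff.mp (Nat.le_zero.mp hl)
    subst this
    simp [splitSep] at hp
  | succ n ih =>
    intro l hl p hp
    obtain ⟨q, qs, hqs⟩ := splitSep_cons sep l
    rcases splitSep_unfold sep l q qs hqs with ⟨h1, _⟩ | ⟨t, h1, h2⟩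
    · rw [hqs, h1] at hp
      simp at hp
    · have hqs_ne : qs ≠ [] := by
        rw [← h2]; exact splitSep_ne_nil sep t
      rw [hqs, List.dropLast_cons_of_ne_nil hqs_ne, List.mem_cons] at hp
      rcases hp with hp | hp
      · exact ⟨[], t, by rw [h1, hp]; simp⟩
      · have hlt : t.length ≤ n := by
          have := congrArg List.length h1
          simp at this
          omega
        obtain ⟨s', t', hst⟩ := ih t hlt p (by rw [h2]; exact hp)
        exact ⟨q ++ sep :: s', t', by rw [h1, hst]; simp⟩

theorem startsDigit_takeWhile (l : List Char) :
    startsDigit (l.takeWhile (fun c => !(c == '}'))) = startsDigit l := by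
  cases l with
  | nil => simp
  | cons c t =>
    by_cases hc : c = '}'
    · subst hc
      simp [List.takeWhile_cons, startsDigit]
      decide
    · simp [List.takeWhile_cons, hc, startsDigit]

-- ---- A's loop produces one set per '}'-terminated piece ----

theorem emits_nil_conn (ps : List (List Char)) :
    emits [] ps = ps.map (fun q => PySem.Set.ofList (emit [] q)) := by
  cases ps <;> simp [emits]

theorem aRun_eq_emits : ∀ (l conn : List Char),
    aRun l conn = emits conn ((splitSep '}' l).dropLast) := by
  intro l
  induction l with
  | nil => intro conn; simp [aRun, splitSep, emits]
  | cons c rest ih =>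
    intro conn
    obtain ⟨q, qs, hqs⟩ := splitSep_cons '}' rest
    by_cases hbr : c = '}'
    · subst hbr
      have e1 : ('}' : Char) ≠ '{' := by decide
      have hd : PySem.Chars.isdigit '}' = false := by decide
      have hL : aRun ('}' :: rest) conn
          = PySem.Set.ofList ((PySem.Chars.split₀ conn).map String.ofList) :: aRun rest [] := by
        simp [aRun, hd, e1]
      have hsplit : splitSep '}' ('}' :: rest) = [] :: q :: qs := by simp [splitSep, hqs]
      rw [hL, ih [], hqs, hsplit, List.dropLast_cons₂]
      rw [emits_nil_conn]
      rw [show emits conn ([] :: (q :: qs).dropLast)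
          = PySem.Set.ofList (emit conn []) ::
              ((q :: qs).dropLast).map (fun r => PySem.Set.ofList (emit [] r)) from rfl]
      simp [emit, connAfter]
    · have hsplit : splitSep '}' (c :: rest) = (c :: q) :: qs := by
        simp [splitSep, hbr, hqs]
      have hupd : aRun (c :: rest) conn
          = aRun rest (if PySem.Chars.isdigit c then conn ++ [c]
              else if c = ' ' && startsDigit rest then conn ++ [' '] else conn) := by
        by_cases hd : PySem.Chars.isdigit c = true
        · have hsp : (c = ' ' && startsDigit rest) = false := by
            by_cases hspc : c = ' '
            · subst hspc; exact absurd hd (by decide)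
            · simp [hspc]
          simp [aRun, hd, hsp]
        · simp only [Bool.not_eq_true] at hd
          by_cases hob : c = '{'
          · subst hob
            have e2 : ('{' : Char) ≠ ' ' := by decide
            simp [aRun, hd, e2]
          · by_cases hsp : c = ' '
            · subst hsp
              by_cases hsd : startsDigit rest = true <;>
                simp [aRun, hd, hbr, hsd]
            · simp [aRun, hd, hob, hbr, hsp]
      rw [hupd, ih _, hqs, hsplit]
      cases qs with
      | nil => simp [emits]
      | cons q2 qs2 =>
        rw [List.dropLast_cons₂, List.dropLast_cons₂]
        have hq : q = rest.takeWhile (fun x => !(x == '}')) := by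
          have h' := splitSep_head_takeWhile '}' rest
          rw [hqs] at h'
          simpa using h'
        have hsdq : startsDigit q = startsDigit rest := by
          rw [hq, startsDigit_takeWhile]
        have hca : connAfter conn (c :: q)
            = connAfter (if PySem.Chars.isdigit c then conn ++ [c]
                else if c = ' ' && startsDigit rest then conn ++ [' '] else conn) q := by
          rw [show connAfter conn (c :: q)
              = connAfter (if PySem.Chars.isdigit c then conn ++ [c]
                  else if c = ' ' && startsDigit q then conn ++ [' '] else conn) q from rfl]
          rw [hsdq]
        rw [show emits (if PySem.Chars.isdigit c then conn ++ [c]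
              else if c = ' ' && startsDigit rest then conn ++ [' '] else conn)
              (q :: (q2 :: qs2).dropLast)
            = PySem.Set.ofList (emit (if PySem.Chars.isdigit c then conn ++ [c]
                else if c = ' ' && startsDigit rest then conn ++ [' '] else conn) q) ::
                ((q2 :: qs2).dropLast).map (fun r => PySem.Set.ofList (emit [] r)) from rfl]
        rw [show emits conn ((c :: q) :: (q2 :: qs2).dropLast)
            = PySem.Set.ofList (emit conn (c :: q)) ::
                ((q2 :: qs2).dropLast).map (fun r => PySem.Set.ofList (emit [] r)) from rfl]
        rw [show emit conn (c :: q)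
            = (PySem.Chars.split₀ (connAfter conn (c :: q))).map String.ofList from rfl]
        rw [hca]
        rfl

-- ---- evaluating port A's index loop into aRun ----

def aBody (string : String) (st : List (List String) × String) (idx : Int) :
    List (List String) × String :=
  let result := st.1
  let conn_str := st.2
  let str := (PySem.Str.pyGet? string idx).getD ' '
  let conn_str := if PySem.Chars.isdigit str then conn_str.push str else conn_str
  if str = '{' then (result, conn_str)
  else if str = '}' then
    let split_strs := PySem.Str.split₀ conn_str
    let temp_list := split_strs.foldl (fun tl s => tl ++ [s]) ([] : List String)
    (result ++ [PySem.Set.ofList temp_list], "")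
  else if str = ' ' then
    if ((PySem.Str.pyGet? string (idx + 1)).map PySem.Chars.isdigit).getD false
    then (result, conn_str.push ' ')
    else (result, conn_str)
  else (result, conn_str)

theorem portA_eq (s : String) :
    custom_list s
      = ((PySem.List.pyRange 0
            (PySem.Str.len (PySem.Str.replace (PySem.Str.slice s (some 1) (some (-1))) "," " ")) 1).foldl
          (aBody (PySem.Str.replace (PySem.Str.slice s (some 1) (some (-1))) "," " "))
          (([] : List (List String)), ("" : String))).1 := rfl

theorem str_split₀_ofList (conn : List Char) :
    PySem.Str.split₀ (String.ofList conn) = (PySem.Chars.split₀ conn).map String.ofList := by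
  simp [PySem.Str.split₀]

theorem foldA (S : String) : ∀ (n k : Nat) (acc : List (List String)) (conn : List Char),
    k + n = S.toList.length →
    ((PySem.List.pyRange (k : Int) ((S.toList.length : Nat) : Int) 1).foldl (aBody S)
        (acc, String.ofList conn)).1
      = acc ++ aRun (S.toList.drop k) conn := by
  intro n
  induction n with
  | zero =>
    intro k acc conn hk
    have hk' : k = S.toList.length := by omega
    subst hk'
    rw [pyRange_self]
    simp only [List.foldl_nil]
    rw [List.drop_length]
    simp [aRun]
  | succ n ih =>
    intro k acc conn hk
    have hklt : k < S.toList.length := by omega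
    have hcast : ((k : Int) < ((S.toList.length : Nat) : Int)) := by exact_mod_cast hklt
    rw [PySem.List.pyRange_one_cons hcast, List.foldl_cons]
    have hc1 : ((k : Int) + 1) = (((k + 1 : Nat)) : Int) := by push_cast; ring
    have hdrop : S.toList.drop k = S.toList[k] :: S.toList.drop (k + 1) :=
      List.drop_eq_getElem_cons hklt
    have hget : PySem.Str.pyGet? S (k : Int) = some (S.toList[k]'hklt) := by
      show PySem.Chars.pyGet? S.toList (k : Int) = _
      rw [PySem.Chars.pyGet?_eq_listPyGet?, PySem.List.pyGet?_natCast]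
      exact List.getElem?_eq_getElem hklt
    have hget2 : ((PySem.Str.pyGet? S ((k : Int) + 1)).map PySem.Chars.isdigit).getD false
        = startsDigit (S.toList.drop (k + 1)) := by
      show ((PySem.Chars.pyGet? S.toList ((k : Int) + 1)).map _).getD _ = _
      rw [PySem.Chars.pyGet?_eq_listPyGet?, hc1, PySem.List.pyGet?_natCast, ← List.head?_drop,
        startsDigit_head?]
    simp only [aBody, hget, hget2, Option.getD_some]
    by_cases hd : PySem.Chars.isdigit (S.toList[k]'hklt) = true
    · have hob : S.toList[k]'hklt ≠ '{' := fun h => absurd hd (by rw [h]; decide)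
      have hcb : S.toList[k]'hklt ≠ '}' := fun h => absurd hd (by rw [h]; decide)
      have hsp : S.toList[k]'hklt ≠ ' ' := fun h => absurd hd (by rw [h]; decide)
      rw [if_pos hd, if_neg hob, if_neg hcb, if_neg hsp]
      rw [ofList_push, hc1, ih (k + 1) acc (conn ++ [S.toList[k]'hklt]) (by omega), hdrop]
      simp [aRun, hd]
    · have hdneg : ¬ (PySem.Chars.isdigit (S.toList[k]'hklt) = true) := hd
      simp only [Bool.not_eq_true] at hd
      rw [if_neg hdneg]
      by_cases hob : S.toList[k]'hklt = '{'
      · rw [if_pos hob]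
        rw [hc1, ih (k + 1) acc conn (by omega), hdrop]
        have f1 : PySem.Chars.isdigit '{' = false := by decide
        simp [aRun, hob, f1]
      · rw [if_neg hob]
        by_cases hcb : S.toList[k]'hklt = '}'
        · rw [if_pos hcb]
          rw [str_split₀_ofList, foldl_snoc, List.nil_append, ofList_nil]
          rw [hc1, ih (k + 1) _ [] (by omega), hdrop]
          have f1 : PySem.Chars.isdigit '}' = false := by decide
          have f2 : ('}' : Char) ≠ '{' := by decide
          simp [aRun, hcb, f1, f2]
        · rw [if_neg hcb]
          by_cases hsp : S.toList[k]'hklt = ' '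
          · rw [if_pos hsp]
            have f1 : PySem.Chars.isdigit ' ' = false := by decide
            have f2 : (' ' : Char) ≠ '{' := by decide
            have f3 : (' ' : Char) ≠ '}' := by decide
            by_cases hsd : startsDigit (S.toList.drop (k + 1)) = true
            · rw [if_pos hsd, ofList_push, hc1, ih (k + 1) acc (conn ++ [' ']) (by omega), hdrop]
              simp [aRun, hsp, hsd, f1, f2, f3]
            · rw [if_neg hsd, hc1, ih (k + 1) acc conn (by omega), hdrop]
              simp [aRun, hsp, hsd, f1, f2, f3]
          · rw [if_neg hsp]
            rw [hc1, ih (k + 1) acc conn (by omega), hdrop]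
            simp [aRun, hd, hob, hcb, hsp]

theorem foldA0 (S : String) :
    (((PySem.List.pyRange 0 (PySem.Str.len S) 1).foldl (aBody S)
        (([] : List (List String)), ("" : String))).1)
      = aRun S.toList [] := by
  have hlen : PySem.Str.len S = ((S.toList.length : Nat) : Int) := rfl
  have h := foldA S S.toList.length 0 [] [] (Nat.zero_add _)
  rw [List.drop_zero, Nat.cast_zero, ← ofList_nil] at h
  rw [hlen]
  simpa using h

-- ---- the stripped-and-replaced string, at the character level ----

theorem slice_1_neg1 {α : Type} (xs : List α) :
    PySem.List.slice xs (some 1) (some (-1)) = xs.tail.dropLast := by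
  cases xs with
  | nil => rfl
  | cons c t =>
    have h0 : ¬((t.length : Int) < 0) := by omega
    simp [PySem.List.slice, PySem.List.clampIdx, List.dropLast_eq_take, h0]

theorem replace_go_comma : ∀ (fuel : Nat) (l acc : List Char), l.length ≤ fuel →
    PySem.Chars.replace.go [','] [' '] fuel l acc
      = acc.reverse ++ l.map (fun c => if c = ',' then ' ' else c) := by
  intro fuel
  induction fuel with
  | zero =>
    intro l acc h
    have : l = [] := List.length_eq_zero_iff.mp (Nat.le_zero.mp h)
    subst this
    simp [PySem.Chars.replace.go]
  | succ fuel ih =>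
    intro l acc h
    cases l with
    | nil => simp [PySem.Chars.replace.go]
    | cons c t =>
      by_cases hc : c = ','
      · subst hc
        have hpre : [','].isPrefixOf (',' :: t) = true := by simp [List.isPrefixOf]
        simp only [PySem.Chars.replace.go, hpre, if_pos, List.length_cons, List.length_nil,
          List.drop_succ_cons, List.drop_zero, List.reverse_cons, List.reverse_nil]
        rw [show ([] ++ [' '] ++ acc : List Char) = (' ' :: acc) from rfl]
        rw [ih t (' ' :: acc) (by simpa using Nat.le_of_succ_le_succ h)]
        simp
      · have hpre : [','].isPrefixOf (c :: t) = false := by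
          simp [List.isPrefixOf, Ne.symm hc]
        simp only [PySem.Chars.replace.go, hpre, Bool.false_eq_true, if_false]
        rw [ih t (c :: acc) (by simpa using Nat.le_of_succ_le_succ h)]
        simp [hc]

theorem replace_comma (l : List Char) :
    PySem.Chars.replace l [','] [' '] = l.map (fun c => if c = ',' then ' ' else c) := by
  rw [show PySem.Chars.replace l [','] [' '] = PySem.Chars.replace.go [','] [' '] l.length l []
      from by simp [PySem.Chars.replace]]
  rw [replace_go_comma l.length l [] (le_refl _)]
  simp

theorem replace_go_brace : ∀ (fuel : Nat) (l acc : List Char), l.length ≤ fuel →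
    PySem.Chars.replace.go ['{'] [] fuel l acc
      = acc.reverse ++ l.filter (fun c => !(c == '{')) := by
  intro fuel
  induction fuel with
  | zero =>
    intro l acc h
    have : l = [] := List.length_eq_zero_iff.mp (Nat.le_zero.mp h)
    subst this
    simp [PySem.Chars.replace.go]
  | succ fuel ih =>
    intro l acc h
    cases l with
    | nil => simp [PySem.Chars.replace.go]
    | cons c t =>
      by_cases hc : c = '{'
      · subst hc
        have hpre : ['{'].isPrefixOf ('{' :: t) = true := by simp [List.isPrefixOf]
        simp only [PySem.Chars.replace.go, hpre, if_pos, List.length_cons, List.length_nil,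
          List.drop_succ_cons, List.drop_zero, List.reverse_nil, List.nil_append]
        rw [ih t acc (by simpa using Nat.le_of_succ_le_succ h)]
        simp [List.filter_cons]
      · have hpre : ['{'].isPrefixOf (c :: t) = false := by
          simp [List.isPrefixOf, Ne.symm hc]
        simp only [PySem.Chars.replace.go, hpre, Bool.false_eq_true, if_false]
        rw [ih t (c :: acc) (by simpa using Nat.le_of_succ_le_succ h)]
        simp [List.filter_cons, hc]

theorem replace_brace (l : List Char) :
    PySem.Chars.replace l ['{'] [] = l.filter (fun c => !(c == '{')) := by
  rw [show PySem.Chars.replace l ['{'] [] = PySem.Chars.replace.go ['{'] [] l.length l []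
      from by simp [PySem.Chars.replace]]
  rw [replace_go_brace l.length l [] (le_refl _)]
  simp

theorem inner_toList (s : String) :
    (PySem.Str.replace (PySem.Str.slice s (some 1) (some (-1))) "," " ").toList = pvInner s := by
  rw [PySem.Str.toList_replace, PySem.Str.toList_slice, PySem.Chars.slice_eq_listSlice,
    slice_1_neg1]
  rw [show (",".toList) = [','] from rfl, show ((" " : String).toList) = [' '] from rfl,
    replace_comma]
  rfl

-- ---- evaluating port B ----

theorem mapF_dropLast {α β γ : Type} (f : α → β) (F : β → γ) (G : α → γ) (X : List α)
    (h : ∀ x, F (f x) = G x) : ((X.map f).dropLast).map F = X.dropLast.map G := by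
  rw [← List.map_dropLast, List.map_map]
  exact List.map_congr_left (fun x _ => h x)

theorem portB_eq (s : String) :
    custom_list_alt s
      = ((splitSep '}' (pvInner s)).dropLast).map
          (fun q => PySem.Set.ofList
            ((PySem.Chars.split₀ (q.filter (fun c => !(c == '{')))).map String.ofList)) := by
  show (((PySem.Str.split?
      (PySem.Str.replace (PySem.Str.slice s (some 1) (some (-1))) "," " ") "}").getD []).dropLast).map
        (fun group => PySem.Set.ofList (PySem.Str.split₀ (PySem.Str.replace group "{" ""))) = _
  have hsplit : (PySem.Str.split?
        (PySem.Str.replace (PySem.Str.slice s (some 1) (some (-1))) "," " ") "}").getD []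
      = (splitSep '}' (pvInner s)).map String.ofList := by
    show (Option.map (fun x => List.map String.ofList x)
        (PySem.Chars.split? _ "}".toList)).getD [] = _
    rw [inner_toList]
    rw [show ("}".toList) = ['}'] from rfl]
    rw [show PySem.Chars.split? (pvInner s) ['}']
        = some (PySem.Chars.splitOn (pvInner s) ['}']) by simp [PySem.Chars.split?]]
    rw [splitOn_eq]
    rw [Option.map_some, Option.getD_some]
  rw [hsplit]
  apply mapF_dropLast
  intro q
  show PySem.Set.ofList (PySem.Str.split₀ (PySem.Str.replace (String.ofList q) "{" "")) = _
  have hrep : PySem.Str.replace (String.ofList q) "{" ""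
      = String.ofList (q.filter (fun c => !(c == '{'))) := by
    show String.ofList (PySem.Chars.replace (String.ofList q).toList "{".toList "".toList) = _
    rw [String.toList_ofList, show ("{".toList) = ['{'] from rfl,
      show (("" : String).toList) = ([] : List Char) from rfl, replace_brace]
  rw [hrep, str_split₀_ofList]

-- ---- per-piece equality of the two token extractions ----

theorem connAfter_append : ∀ (l conn : List Char), connAfter conn l = conn ++ connAfter [] l := by
  intro l
  induction l with
  | nil => intro conn; simp [connAfter]
  | cons c rest ih =>
    intro conn
    simp only [connAfter]
    split_ifs with h1 h2
    · rw [ih (conn ++ [c]), ih ([] ++ [c])]; simp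
    · rw [ih (conn ++ [' ']), ih ([] ++ [' '])]; simp
    · exact ih conn

theorem connAfter_cons (c : Char) (r conn : List Char) :
    connAfter conn (c :: r)
      = connAfter (if PySem.Chars.isdigit c then conn ++ [c]
          else if c = ' ' && startsDigit r then conn ++ [' '] else conn) r := rfl

theorem connAfter_cons_digit (c : Char) (hd : PySem.Chars.isdigit c = true) (r conn : List Char) :
    connAfter conn (c :: r) = connAfter (conn ++ [c]) r := by
  rw [connAfter_cons]
  simp [hd]

theorem connAfter_cons_space (r conn : List Char) :
    connAfter conn (' ' :: r)
      = connAfter (if startsDigit r then conn ++ [' '] else conn) r := by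
  rw [connAfter_cons]
  have hdd : PySem.Chars.isdigit ' ' = false := by decide
  by_cases hsd : startsDigit r = true <;> simp [hdd, hsd]

theorem connAfter_cons_other (c : Char) (hd : PySem.Chars.isdigit c = false) (hs : c ≠ ' ')
    (r conn : List Char) : connAfter conn (c :: r) = connAfter conn r := by
  rw [connAfter_cons]
  simp [hd, hs]

theorem connAfter_words : ∀ (r : List Char),
    (∀ c ∈ r, PySem.Chars.isdigit c = true ∨ c = ' ') →
    ∀ cur, wordsAux cur (connAfter [] r) = wordsAux cur r := by
  intro r
  induction r with
  | nil => intro _ cur; rfl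
  | cons c r' ih =>
    intro h cur
    have hr' : ∀ x ∈ r', PySem.Chars.isdigit x = true ∨ x = ' ' := fun x hx => h x (by simp [hx])
    rcases h c (by simp) with hd | hsp
    · have hns : PySem.Chars.isspace c = false := isspace_of_isdigit c hd
      have hstep : connAfter [] (c :: r') = c :: connAfter [] r' := by
        rw [connAfter_cons_digit c hd, connAfter_append r' ([] ++ [c])]
        rfl
      rw [hstep]
      simp only [wordsAux, hns, Bool.false_eq_true, if_false]
      exact ih hr' (cur ++ [c])
    · subst hsp
      have hssp : PySem.Chars.isspace ' ' = true := by decide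
      have hdd : PySem.Chars.isdigit ' ' = false := by decide
      by_cases hsd : startsDigit r' = true
      · have hstep : connAfter [] (' ' :: r') = ' ' :: connAfter [] r' := by
          rw [connAfter_cons_space r' [], hsd, if_pos rfl, connAfter_append r' ([] ++ [' '])]
          rfl
        rw [hstep]
        by_cases hcur : cur = []
        · simp only [wordsAux, hssp, if_pos, hcur, if_true]
          exact ih hr' []
        · simp only [wordsAux, hssp, if_pos, hcur, if_false, if_neg hcur]
          rw [ih hr' []]
      · have hstep : connAfter [] (' ' :: r') = connAfter [] r' := by
          rw [connAfter_cons_space r' []]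
          simp [hsd]
        rw [hstep, ih hr' cur]
        cases r' with
        | nil => rfl
        | cons e r'' =>
          have he : e = ' ' := by
            rcases hr' e (by simp) with hde | hse
            · exact absurd (by simpa [startsDigit] using hde) hsd
            · exact hse
          subst he
          by_cases hcur : cur = [] <;>
            simp [wordsAux, hssp, hcur]

theorem piece_words : ∀ (q : List Char),
    (∀ c ∈ q, PySem.Chars.isdigit c = true ∨ c = ' ' ∨ c = '{') →
    (∀ (a b c : List Char) (d : Char),
        q = a ++ d :: (b ++ '{' :: c) → PySem.Chars.isdigit d = true → False) →
    wordsAux [] (connAfter [] q) = wordsAux [] (q.filter (fun c => !(c == '{'))) := by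
  intro q
  induction q with
  | nil => intro _ _; rfl
  | cons c r ih =>
    intro halpha hnb
    have hr_alpha : ∀ x ∈ r, PySem.Chars.isdigit x = true ∨ x = ' ' ∨ x = '{' :=
      fun x hx => halpha x (by simp [hx])
    rcases halpha c (by simp) with hd | hsp | hob
    · -- digit head: the rest contains no '{' at all
      have hnob : '{' ∉ r := by
        intro hmem
        obtain ⟨b, c', hbc⟩ := List.append_of_mem hmem
        exact hnb [] b c' c (by rw [hbc]; rfl) hd
      have hrds : ∀ x ∈ r, PySem.Chars.isdigit x = true ∨ x = ' ' := by
        intro x hx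
        rcases hr_alpha x hx with h1 | h2 | h3
        · exact Or.inl h1
        · exact Or.inr h2
        · exact absurd (h3 ▸ hx) hnob
      have hfil : r.filter (fun c => !(c == '{')) = r := by
        apply List.filter_eq_self.mpr
        intro a ha
        have : a ≠ '{' := fun he => hnob (he ▸ ha)
        simp [this]
      have hcob : c ≠ '{' := fun he => absurd hd (by rw [he]; decide)
      have hns : PySem.Chars.isspace c = false := isspace_of_isdigit c hd
      have hstep : connAfter [] (c :: r) = c :: connAfter [] r := by
        rw [connAfter_cons_digit c hd, connAfter_append r ([] ++ [c])]
        rfl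
      rw [hstep]
      have hfilc : (c :: r).filter (fun c => !(c == '{')) = c :: r := by
        simp [List.filter_cons, hcob, hfil]
      rw [hfilc]
      simp only [wordsAux, hns, Bool.false_eq_true, if_false, List.nil_append]
      exact connAfter_words r hrds [c]
    · -- space head
      subst hsp
      have hssp : PySem.Chars.isspace ' ' = true := by decide
      have hdd : PySem.Chars.isdigit ' ' = false := by decide
      have hnbr : ∀ (a b c : List Char) (d : Char),
          r = a ++ d :: (b ++ '{' :: c) → PySem.Chars.isdigit d = true → False := by
        intro a b c d hr hd
        exact hnb (' ' :: a) b c d (by rw [hr]; rfl) hd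
      have hstep : wordsAux [] (connAfter [] (' ' :: r)) = wordsAux [] (connAfter [] r) := by
        by_cases hsd : startsDigit r = true
        · have heq : connAfter [] (' ' :: r) = ' ' :: connAfter [] r := by
            rw [connAfter_cons_space r [], hsd, if_pos rfl, connAfter_append r ([] ++ [' '])]
            rfl
          rw [heq]
          simp [wordsAux, hssp]
        · have heq : connAfter [] (' ' :: r) = connAfter [] r := by
            rw [connAfter_cons_space r []]
            simp [hsd]
          rw [heq]
      rw [hstep, ih hr_alpha hnbr]
      have hfilc : (' ' :: r).filter (fun c => !(c == '{')) = ' ' :: r.filter (fun c => !(c == '{')) := by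
        simp [List.filter_cons]
      rw [hfilc]
      simp [wordsAux, hssp]
    · -- '{' head
      subst hob
      have hdd : PySem.Chars.isdigit '{' = false := by decide
      have hsp2 : ('{' : Char) ≠ ' ' := by decide
      have hnbr : ∀ (a b c : List Char) (d : Char),
          r = a ++ d :: (b ++ '{' :: c) → PySem.Chars.isdigit d = true → False := by
        intro a b c d hr hd
        exact hnb ('{' :: a) b c d (by rw [hr]; rfl) hd
      have hstep : connAfter [] ('{' :: r) = connAfter [] r :=
        connAfter_cons_other '{' hdd hsp2 r []
      rw [hstep, ih hr_alpha hnbr]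
      simp [List.filter_cons]

theorem piece_eq (q : List Char)
    (halpha : ∀ c ∈ q, PySem.Chars.isdigit c = true ∨ c = ' ' ∨ c = '{')
    (hnb : ∀ (a b c : List Char) (d : Char),
        q = a ++ d :: (b ++ '{' :: c) → PySem.Chars.isdigit d = true → False) :
    PySem.Chars.split₀ (connAfter [] q)
      = PySem.Chars.split₀ (q.filter (fun c => !(c == '{'))) := by
  rw [split₀_eq_wordsAux, split₀_eq_wordsAux]
  exact piece_words q halpha hnb

-- ---- transporting Pre_'s index conditions to list decompositions ----

theorem pre_NA {L : List Char}
    (h : ∀ i ∈ List.range L.length, (∃ m ∈ List.range L.length, i ≤ m ∧ L[m]! = '}') →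
        L[i]! ∈ ['0','1','2','3','4','5','6','7','8','9','{','}',' ']) :
    ∀ (u v : List Char) (c : Char), L = u ++ c :: v → '}' ∈ c :: v →
      c ∈ ['0','1','2','3','4','5','6','7','8','9','{','}',' '] := by
  intro u v c hL hmem
  obtain ⟨t, ht, hgt⟩ := List.mem_iff_getElem.mp hmem
  have hlen : L.length = u.length + (v.length + 1) := by rw [hL]; simp
  have hti : t < v.length + 1 := by simpa using ht
  have hgi : L[u.length]! = c := by
    rw [List.getElem!_eq_getElem?_getD, hL, List.getElem?_append_right (le_refl u.length)]
    simp
  have hgm : L[u.length + t]! = '}' := by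
    rw [List.getElem!_eq_getElem?_getD, hL,
      List.getElem?_append_right (Nat.le_add_right u.length t)]
    have : (c :: v)[t]? = some '}' := by
      rw [List.getElem?_eq_getElem ht, hgt]
    simp [this]
  have := h u.length (List.mem_range.mpr (by omega))
    ⟨u.length + t, List.mem_range.mpr (by omega), Nat.le_add_right _ _, hgm⟩
  rwa [hgi] at this

theorem pre_NB {L : List Char}
    (h : ∀ i ∈ List.range L.length, ∀ j ∈ List.range L.length,
        i < j → PySem.Chars.isdigit (L[i]!) = true → L[j]! = '{' →
        (∃ m ∈ List.range L.length, j ≤ m ∧ L[m]! = '}') →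
        ∃ k ∈ List.range L.length, i < k ∧ k < j ∧ L[k]! = '}') :
    ∀ (a b c : List Char) (d : Char), L = a ++ d :: (b ++ '{' :: c) →
      PySem.Chars.isdigit d = true → '}' ∈ c → '}' ∈ b := by
  intro a b c d hL hd hmem
  obtain ⟨t, ht, hgt⟩ := List.mem_iff_getElem.mp hmem
  have hlen : L.length = a.length + (b.length + (c.length + 2)) := by rw [hL]; simp; omega
  have hgi : L[a.length]! = d := by
    rw [List.getElem!_eq_getElem?_getD, hL, List.getElem?_append_right (le_refl a.length)]
    simp
  have hgj : L[a.length + 1 + b.length]! = '{' := by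
    rw [List.getElem!_eq_getElem?_getD, hL,
      List.getElem?_append_right (by omega : a.length ≤ a.length + 1 + b.length)]
    have h1 : a.length + 1 + b.length - a.length = b.length + 1 := by omega
    rw [h1, List.getElem?_cons_succ, List.getElem?_append_right (le_refl b.length)]
    simp
  have hgm : L[a.length + 1 + b.length + 1 + t]! = '}' := by
    rw [List.getElem!_eq_getElem?_getD, hL,
      List.getElem?_append_right (by omega : a.length ≤ a.length + 1 + b.length + 1 + t)]
    have h1 : a.length + 1 + b.length + 1 + t - a.length = b.length + 1 + t + 1 := by omega
    rw [h1, List.getElem?_cons_succ,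
      List.getElem?_append_right (by omega : b.length ≤ b.length + 1 + t)]
    have h2 : b.length + 1 + t - b.length = t + 1 := by omega
    rw [h2, List.getElem?_cons_succ]
    rw [List.getElem?_eq_getElem ht, hgt]
    simp
  obtain ⟨k, hk, hik, hkj, hgk⟩ :=
    h a.length (List.mem_range.mpr (by omega))
      (a.length + 1 + b.length) (List.mem_range.mpr (by omega))
      (by omega) (by rwa [hgi]) hgj
      ⟨a.length + 1 + b.length + 1 + t, List.mem_range.mpr (by omega), by omega, hgm⟩
  have hkL : k < L.length := List.mem_range.mp hk
  have hkb : k - a.length - 1 < b.length := by omega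
  have hkq : L[k]? = b[k - a.length - 1]? := by
    rw [hL, List.getElem?_append_right (by omega : a.length ≤ k)]
    have h1 : k - a.length = (k - a.length - 1) + 1 := by omega
    rw [h1, List.getElem?_cons_succ, List.getElem?_append_left hkb]
    simp
  have : b[k - a.length - 1]? = some '}' := by
    rw [← hkq, List.getElem?_eq_getElem hkL]
    rw [List.getElem!_eq_getElem?_getD, List.getElem?_eq_getElem hkL] at hgk
    simpa using hgk
  exact List.mem_of_getElem? this

-- ---- assembling ----

theorem ports_agree (s : String) (hpre : Pre_custom_list s) :
    custom_list s = custom_list_alt s := by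
  obtain ⟨h1, h2, h3⟩ := hpre
  rw [portA_eq s, foldA0, aRun_eq_emits, emits_nil_conn, inner_toList, portB_eq]
  apply List.map_congr_left
  intro q hq
  obtain ⟨s', t, hL⟩ := splitSep_piece '}' (pvInner s).length (pvInner s) (le_refl _) q hq
  have hnosep : '}' ∉ q :=
    splitSep_no_sep '}' (pvInner s) q (List.dropLast_subset _ hq)
  have halpha : ∀ c ∈ q, PySem.Chars.isdigit c = true ∨ c = ' ' ∨ c = '{' := by
    intro c hc
    obtain ⟨u, v, huv⟩ := List.append_of_mem hc
    have hdec : pvInner s = (s' ++ u) ++ c :: (v ++ '}' :: t) := by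
      rw [hL, huv]; simp
    have hmem : '}' ∈ c :: (v ++ '}' :: t) := by simp
    have hA := pre_NA h1 _ _ _ hdec hmem
    have hcne : c ≠ '}' := fun he => hnosep (he ▸ hc)
    simp only [List.mem_cons, List.not_mem_nil, or_false] at hA
    rcases hA with rfl|rfl|rfl|rfl|rfl|rfl|rfl|rfl|rfl|rfl|rfl|rfl|rfl
    · exact Or.inl (by decide)
    · exact Or.inl (by decide)
    · exact Or.inl (by decide)
    · exact Or.inl (by decide)
    · exact Or.inl (by decide)
    · exact Or.inl (by decide)
    · exact Or.inl (by decide)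
    · exact Or.inl (by decide)
    · exact Or.inl (by decide)
    · exact Or.inl (by decide)
    · exact Or.inr (Or.inr rfl)
    · exact absurd rfl hcne
    · exact Or.inr (Or.inl rfl)
  have hnb : ∀ (a b c : List Char) (d : Char),
      q = a ++ d :: (b ++ '{' :: c) → PySem.Chars.isdigit d = true → False := by
    intro a b c d hq' hd
    have hdec : pvInner s = (s' ++ a) ++ d :: (b ++ '{' :: (c ++ '}' :: t)) := by
      rw [hL, hq']; simp
    have hcm : '}' ∈ c ++ '}' :: t := by simp
    have hb := pre_NB h3 _ _ _ _ hdec hd hcm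
    exact hnosep (by rw [hq']; simp [hb])
  show PySem.Set.ofList (emit [] q) = _
  unfold emit
  rw [piece_eq q halpha hnb]

-- ===== VERDICT (by name: the statement is the Claim_ definition above) =====
theorem custom_list_spec : Claim_equal_custom_list := by
  intro s _ hpre
  unfold Spec_custom_list
  exact ports_agree s hpre
theorem custom_list_raises : Claim_raises_custom_list := by
  unfold Claim_raises_custom_list
  constructor
  · intro s _ hr hpre
    exact hpre.2.1 hr
  · exact ⟨by decide, by decide, by decide⟩
-- self-check: the crash-fix witness value re-read from the proved claim
theorem custom_list_raises_ok :
    custom_list_alt pvRaiseWitness_custom_list = pvRaiseWitnessOut_custom_list :=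
  custom_list_raises.2.2.2
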